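-- pv_equiv track=rewrite | github.com/bmrb-io/rcs | noe_tiers.py | get_trp_tier
-- ===== SOURCE A (Python) =====
-- def get_trp_tier(labels_aroma):
--     high_combos = [
--         ['HE3', 'HZ2'], ['HE3', 'HE1'], ['HE3', 'HD1'],
--         ['HZ3', 'HZ2'], ['HZ3', 'HE1'], ['HZ3', 'HD1'],
--         ['HZ2', 'HD1'], ['HZ2', 'HE1'],
--         ['HH2', 'HD1'], ['HH2', 'HE1']
--     ]
--     low_combos = [
--         ['HE1', 'HD1'], ['HE3', 'HZ3'], ['HE3', 'HH2'],
--         ['HH2', 'HZ3'], ['HH2', 'HZ2']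
--     ]
--     for high_combo in high_combos:
--         if high_combo[0] in labels_aroma and high_combo[1] in labels_aroma:
--             return 'high'
--     for low_combo in low_combos:
--         if low_combo[0] in labels_aroma and low_combo[1] in labels_aroma:
--             return 'low'
--     return 'none'
-- ===== SOURCE B (Python) =====
-- def get_trp_tier(labels_aroma):
--     # Closed-form boolean classification: compute a presence flag per atom once,
--     # then evaluate a factored boolean formula instead of scanning pair lists.
--     s = set(labels_aroma)
--     he3 = 'HE3' in s
--     hz3 = 'HZ3' in s
--     hz2 = 'HZ2' in s
--     hh2 = 'HH2' in s
--     he1 = 'HE1' in s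
--     hd1 = 'HD1' in s
--     high = ((he3 or hz3) and (hz2 or he1 or hd1)) or ((hz2 or hh2) and (he1 or hd1))
--     low = (he1 and hd1) or (he3 and (hz3 or hh2)) or (hh2 and (hz3 or hz2))
--     if high:
--         return 'high'
--     if low:
--         return 'low'
--     return 'none'
-- ===== Notes on version B (the rewrite author's own statement) =====
-- stated objective: simpler
-- what changed: Replaces the two scans over hard-coded pair lists by six one-time presence flags and a factored boolean formula deciding high/low/none.
import Mathlib
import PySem

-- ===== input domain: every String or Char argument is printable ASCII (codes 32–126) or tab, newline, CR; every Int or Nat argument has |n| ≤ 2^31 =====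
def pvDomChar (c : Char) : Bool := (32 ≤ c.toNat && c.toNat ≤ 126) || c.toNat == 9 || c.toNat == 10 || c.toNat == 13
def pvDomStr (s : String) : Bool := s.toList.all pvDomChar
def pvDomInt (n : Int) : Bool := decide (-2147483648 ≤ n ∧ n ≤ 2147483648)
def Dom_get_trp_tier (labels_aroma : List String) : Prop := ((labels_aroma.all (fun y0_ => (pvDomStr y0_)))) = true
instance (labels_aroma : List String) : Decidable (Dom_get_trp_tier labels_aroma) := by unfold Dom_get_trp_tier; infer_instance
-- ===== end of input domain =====

-- B replaces A's scans over hard-coded pair lists with six one-time presence flags and a factored boolean formula (objective: simpler).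


-- ===== PORT A =====
-- A scans the fixed high list, returning 'high' on the first pair whose both atoms
-- are present, then the low list; `List.any` is the first-match-wins loop (all matches return the same string).
def get_trp_tier (labels_aroma : List String) : String :=
  let high_combos : List (String × String) :=
    [("HE3","HZ2"), ("HE3","HE1"), ("HE3","HD1"),
     ("HZ3","HZ2"), ("HZ3","HE1"), ("HZ3","HD1"),
     ("HZ2","HD1"), ("HZ2","HE1"),
     ("HH2","HD1"), ("HH2","HE1")]
  let low_combos : List (String × String) :=
    [("HE1","HD1"), ("HE3","HZ3"), ("HE3","HH2"),
     ("HH2","HZ3"), ("HH2","HZ2")]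
  if high_combos.any (fun c => labels_aroma.contains c.1 && labels_aroma.contains c.2) then "high"
  else if low_combos.any (fun c => labels_aroma.contains c.1 && labels_aroma.contains c.2) then "low"
  else "none"

-- ===== PORT B =====
def get_trp_tier_alt (labels_aroma : List String) : String :=
  let s := PySem.Set.ofList labels_aroma
  let he3 := PySem.Set.contains s "HE3"
  let hz3 := PySem.Set.contains s "HZ3"
  let hz2 := PySem.Set.contains s "HZ2"
  let hh2 := PySem.Set.contains s "HH2"
  let he1 := PySem.Set.contains s "HE1"
  let hd1 := PySem.Set.contains s "HD1"
  let high := ((he3 || hz3) && (hz2 || he1 || hd1)) || ((hz2 || hh2) && (he1 || hd1))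
  let low := (he1 && hd1) || (he3 && (hz3 || hh2)) || (hh2 && (hz3 || hz2))
  if high then "high"
  else if low then "low"
  else "none"

-- ===== PRECONDITION & SPEC =====
def Spec_get_trp_tier (labels_aroma : List String) (out : String) : Prop := out = get_trp_tier_alt labels_aroma
instance (labels_aroma : List String) (out : String) : Decidable (Spec_get_trp_tier labels_aroma out) := by unfold Spec_get_trp_tier; infer_instance

-- ===== CLAIM (what is proved, stated in full; the proofs are below) =====
def Claim_equal_get_trp_tier : Prop := ∀ (labels_aroma : List String), Dom_get_trp_tier labels_aroma → Spec_get_trp_tier labels_aroma (get_trp_tier labels_aroma)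

-- ===== LEMMAS AND PROOFS =====

-- membership in set(xs) coincides with membership in xs
theorem set_contains_eq (xs : List String) (v : String) :
    PySem.Set.contains (PySem.Set.ofList xs) v = xs.contains v := by
  rcases h : xs.contains v
  · simp only [List.contains_eq_mem, decide_eq_false_iff_not] at h
    simpa [PySem.Set.contains_iff, PySem.Set.mem_ofList] using h
  · simp only [List.contains_eq_mem, decide_eq_true_eq] at h
    simpa [PySem.Set.contains_iff, PySem.Set.mem_ofList] using h

-- both programs are the same function of the six presence flags
theorem tier_bool (a b c d e f : Bool) :
    (if (a && c || (a && e || (a && f || (b && c || (b && e || (b && f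
         || (c && f || (c && e || (d && f || d && e))))))))) then "high"
     else if (e && f || (a && b || (a && d || (d && b || d && c)))) then "low"
     else "none")
    = (if ((a || b) && (c || e || f)) || ((c || d) && (e || f)) then "high"
       else if (e && f) || (a && (b || d)) || (d && (b || c)) then "low"
       else "none") := by
  cases a <;> cases b <;> cases c <;> cases d <;> cases e <;> cases f <;> rfl

-- ===== VERDICT (by name: the statement is the Claim_ definition above) =====
theorem get_trp_tier_spec : Claim_equal_get_trp_tier := by
  intro l _
  show get_trp_tier l = get_trp_tier_alt l
  simp only [get_trp_tier, get_trp_tier_alt, List.any_cons, List.any_nil, Bool.or_false,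
    set_contains_eq]
  exact tier_bool (l.contains "HE3") (l.contains "HZ3") (l.contains "HZ2")
    (l.contains "HH2") (l.contains "HE1") (l.contains "HD1")
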